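-- pv_equiv track=rewrite | github.com/killerloop85/ios-routing | scripts/update_routing_lists.py | render_list
-- ===== SOURCE A (Python) =====
-- from typing import Dict, Iterable, List, Sequence, Set
--
-- def compact_domains(domains: Iterable[str], always_keep: Set[str] | None = None) -> List[str]:
--     always_keep = always_keep or set()
--     ordered = sorted(set(domains), key=lambda item: (item.count("."), item))
--     selected: List[str] = []
--     for domain in ordered:
--         if domain in always_keep:
--             selected.append(domain)
--             continue
--         if any(domain == keep or domain.endswith("." + keep) for keep in selected):
--             continue
--         selected.append(domain)
--     return sorted(set(selected), key=lambda item: (item.count("."), item))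
--
-- def unique_preserve_order(domains: Iterable[str]) -> List[str]:
--     seen: Set[str] = set()
--     ordered: List[str] = []
--     for domain in domains:
--         if domain not in seen:
--             seen.add(domain)
--             ordered.append(domain)
--     return ordered
--
-- def render_list(
--     header_lines: Sequence[str],
--     manual_sections: Dict[str, List[str]],
--     extra_sections: Dict[str, List[str]] | None = None,
--     tail_comment: str | None = None,
--     tail_domains: Sequence[str] = (),
-- ) -> str:
--     lines = list(header_lines) + [""]
--     first = True
--     combined_sections: List[tuple[str, List[str]]] = []
--     for section_name, domains in manual_sections.items():
--         combined_sections.append((section_name, unique_preserve_order(domains)))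
--     for section_name, domains in (extra_sections or {}).items():
--         combined_sections.append((section_name, compact_domains(domains)))
--
--     for section_name, domains in combined_sections:
--         if not domains:
--             continue
--         if not first:
--             lines.append("")
--         first = False
--         lines.append(f"# {section_name}")
--         lines.extend(f"DOMAIN-SUFFIX,{domain}" for domain in domains)
--     if tail_domains:
--         lines.append("")
--         if tail_comment:
--             lines.append(f"# {tail_comment}")
--         lines.extend(f"DOMAIN-SUFFIX,{domain}" for domain in tail_domains)
--     lines.append("")
--     return "\n".join(lines)
-- ===== SOURCE B (Python) =====
-- from typing import Dict, List, Optional, Sequence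
--
--
-- def _compacted(domains) -> List[str]:
--     uniq = sorted(set(domains), key=lambda d: (d.count("."), d))
--     return [d for d in uniq if not any(d.endswith("." + e) for e in uniq)]
--
--
-- def render_list(
--     header_lines: Sequence[str],
--     manual_sections: Dict[str, List[str]],
--     extra_sections: Optional[Dict[str, List[str]]] = None,
--     tail_comment: Optional[str] = None,
--     tail_domains: Sequence[str] = (),
-- ) -> str:
--     sections = [(n, list(dict.fromkeys(ds))) for n, ds in manual_sections.items()]
--     sections += [(n, _compacted(ds)) for n, ds in (extra_sections or {}).items()]
--     blocks = [["# " + n] + ["DOMAIN-SUFFIX," + d for d in ds] for n, ds in sections if ds]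
--     body = [line for i, blk in enumerate(blocks) for line in (blk if i == 0 else [""] + blk)]
--     tail = ([""] + (["# " + tail_comment] if tail_comment else [])
--             + ["DOMAIN-SUFFIX," + d for d in tail_domains]) if tail_domains else []
--     return "\n".join(list(header_lines) + [""] + body + tail + [""])
-- ===== Notes on version B (the rewrite author's own statement) =====
-- stated objective: alternative
-- what changed: compact_domains' greedy scan that grows and re-scans a `selected` accumulator is replaced by a single filter keeping a domain iff no member of the whole deduplicated set is a dot-boundary suffix of it (correct because suffix-ancestry is transitive), and render_list is rebuilt by comprehension/intercalation of section blocks instead of a mutable lines list with a `first` flag.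
import Mathlib
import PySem

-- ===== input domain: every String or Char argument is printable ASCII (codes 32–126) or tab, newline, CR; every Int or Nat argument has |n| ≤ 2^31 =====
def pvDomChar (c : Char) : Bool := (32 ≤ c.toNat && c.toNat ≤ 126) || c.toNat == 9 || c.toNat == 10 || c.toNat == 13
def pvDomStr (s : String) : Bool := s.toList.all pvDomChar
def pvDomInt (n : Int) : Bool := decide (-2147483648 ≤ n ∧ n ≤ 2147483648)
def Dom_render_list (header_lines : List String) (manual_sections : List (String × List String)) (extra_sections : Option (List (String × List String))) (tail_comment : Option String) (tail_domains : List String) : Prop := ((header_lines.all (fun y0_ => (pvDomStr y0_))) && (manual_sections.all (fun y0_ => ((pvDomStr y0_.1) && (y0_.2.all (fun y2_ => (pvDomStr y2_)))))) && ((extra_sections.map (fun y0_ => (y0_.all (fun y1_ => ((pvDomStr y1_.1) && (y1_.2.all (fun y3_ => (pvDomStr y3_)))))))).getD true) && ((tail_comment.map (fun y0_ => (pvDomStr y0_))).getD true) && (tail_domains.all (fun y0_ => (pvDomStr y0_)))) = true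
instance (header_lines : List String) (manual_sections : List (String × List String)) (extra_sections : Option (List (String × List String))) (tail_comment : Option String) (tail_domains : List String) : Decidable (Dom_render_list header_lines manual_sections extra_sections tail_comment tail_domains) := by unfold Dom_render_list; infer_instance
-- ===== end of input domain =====

-- B renders the list by comprehension/intercalation (no mutable `lines` list, no `first`
-- flag) and replaces the greedy suffix-compaction loop by a one-shot filter against the
-- whole deduplicated set; objective: alternative (structurally different, same cost).

-- ===== PORT A =====

-- unique_preserve_order: the seen-set + ordered-list loop, literally
def pvUPO (domains : List String) : List String :=
  (domains.foldl
    (fun (p : PySem.Set String × List String) domain =>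
      if p.1.contains domain then p else (p.1.add domain, p.2 ++ [domain]))
    (PySem.Set.empty, [])).2

-- compact_domains(domains, always_keep): sort by (count('.'), item), greedy scan over
-- `selected`, then the final sorted(set(selected), …)
def pvCompactA (domains : List String) (always_keep : PySem.Set String) : List String :=
  let ordered := PySem.List.sorted2 (PySem.Set.ofList domains)
    (fun it => PySem.Str.count it ".") (fun it => it) false
  let selected := ordered.foldl
    (fun (sel : List String) domain =>
      if always_keep.contains domain then sel ++ [domain]
      else if sel.any (fun keep => domain == keep || PySem.Str.endswith domain ("." ++ keep)) then sel
      else sel ++ [domain]) []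
  PySem.List.sorted2 (PySem.Set.ofList selected)
    (fun it => PySem.Str.count it ".") (fun it => it) false

def render_list (header_lines : List String) (manual_sections : List (String × List String)) (extra_sections : Option (List (String × List String))) (tail_comment : Option String) (tail_domains : List String) : String :=
  let lines := header_lines ++ [""]
  let combined : List (String × List String) :=
    (PySem.Dict.ofList manual_sections).items.map (fun p => (p.1, pvUPO p.2))
    ++ (PySem.Dict.ofList ((extra_sections.getD []))).items.map
        (fun p => (p.1, pvCompactA p.2 PySem.Set.empty))
  let res := combined.foldl
    (fun (p : List String × Bool) sec =>
      if sec.2.isEmpty then p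
      else ((if p.2 then p.1 else p.1 ++ [""]) ++ ["# " ++ sec.1]
              ++ sec.2.map (fun domain => "DOMAIN-SUFFIX," ++ domain), false))
    (lines, true)
  let lines2 := if tail_domains.isEmpty then res.1 else
    res.1 ++ [""]
      ++ (match tail_comment with
          | some tc => if tc = "" then [] else ["# " ++ tc]
          | none => [])
      ++ tail_domains.map (fun domain => "DOMAIN-SUFFIX," ++ domain)
  PySem.Str.join "\n" (lines2 ++ [""])

-- ===== PORT B =====

-- _compacted: dedupe + sort once, then keep d iff no member of the set is a proper
-- dot-boundary suffix of d (no greedy accumulator)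
def pvCompactB (domains : List String) : List String :=
  let uniq := PySem.List.sorted2 (PySem.Set.ofList domains)
    (fun d => PySem.Str.count d ".") (fun d => d) false
  uniq.filter (fun d => !(uniq.any (fun e => PySem.Str.endswith d ("." ++ e))))

def render_list_alt (header_lines : List String) (manual_sections : List (String × List String)) (extra_sections : Option (List (String × List String))) (tail_comment : Option String) (tail_domains : List String) : String :=
  let sections : List (String × List String) :=
    (PySem.Dict.ofList manual_sections).items.map (fun p => (p.1, PySem.List.dedup p.2))
    ++ (PySem.Dict.ofList ((extra_sections.getD []))).items.map
        (fun p => (p.1, pvCompactB p.2))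
  let blocks := (sections.filter (fun p => !p.2.isEmpty)).map
    (fun p => ("# " ++ p.1) :: p.2.map (fun d => "DOMAIN-SUFFIX," ++ d))
  let body := blocks.zipIdx.flatMap (fun q => if q.2 == 0 then q.1 else "" :: q.1)
  let tail := if tail_domains.isEmpty then [] else
    [""]
      ++ (match tail_comment with
          | some tc => if tc = "" then [] else ["# " ++ tc]
          | none => [])
      ++ tail_domains.map (fun d => "DOMAIN-SUFFIX," ++ d)
  PySem.Str.join "\n" (header_lines ++ [""] ++ body ++ tail ++ [""])

-- ===== PRECONDITION & SPEC =====
def Spec_render_list (header_lines : List String) (manual_sections : List (String × List String)) (extra_sections : Option (List (String × List String))) (tail_comment : Option String) (tail_domains : List String) (out : String) : Prop := out = render_list_alt header_lines manual_sections extra_sections tail_comment tail_domains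
instance (header_lines : List String) (manual_sections : List (String × List String)) (extra_sections : Option (List (String × List String))) (tail_comment : Option String) (tail_domains : List String) (out : String) : Decidable (Spec_render_list header_lines manual_sections extra_sections tail_comment tail_domains out) := by unfold Spec_render_list; infer_instance

-- ===== CLAIM (what is proved, stated in full; the proofs are below) =====
def Claim_equal_render_list : Prop := ∀ (header_lines : List String) (manual_sections : List (String × List String)) (extra_sections : Option (List (String × List String))) (tail_comment : Option String) (tail_domains : List String), Dom_render_list header_lines manual_sections extra_sections tail_comment tail_domains → Spec_render_list header_lines manual_sections extra_sections tail_comment tail_domains (render_list header_lines manual_sections extra_sections tail_comment tail_domains)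

-- ===== LEMMAS AND PROOFS =====

-- the (count('.'), item) tuple key as one linearly ordered key
def pvKey (d : String) : Lex (ℕ × String) := toLex (PySem.Str.count d ".", d)

-- "e is a proper dot-boundary suffix of d"
def pvSuf (e d : String) : Prop := ('.' :: e.toList) <:+ d.toList

theorem pvUPO_aux (ds : List String) (s : PySem.Set String) :
    ds.foldl (fun (p : PySem.Set String × List String) domain =>
      if p.1.contains domain then p else (p.1.add domain, p.2 ++ [domain])) (s, s)
    = (ds.foldl PySem.Set.add s, ds.foldl PySem.Set.add s) := by
  induction ds generalizing s with
  | nil => rfl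
  | cons d ds ih =>
    rw [List.foldl_cons, List.foldl_cons]
    by_cases h : s.contains d
    · have hadd : PySem.Set.add s d = s := by unfold PySem.Set.add; rw [if_pos h]
      rw [if_pos h, hadd]; exact ih s
    · have hadd : PySem.Set.add s d = s ++ [d] := by unfold PySem.Set.add; rw [if_neg h]
      rw [if_neg h, hadd]; exact ih (s ++ [d])

theorem pvUPO_eq_dedup (ds : List String) : pvUPO ds = PySem.List.dedup ds := by
  unfold pvUPO
  rw [show (PySem.Set.empty, ([] : List String)) = ((PySem.Set.empty : PySem.Set String), (PySem.Set.empty : List String)) from rfl]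
  rw [pvUPO_aux]
  rfl

theorem pvSorted2_eq_sorted (xs : List String) :
    PySem.List.sorted2 xs (fun d => PySem.Str.count d ".") (fun d => d) false
    = PySem.List.sorted xs pvKey false := by
  unfold PySem.List.sorted2 PySem.List.sorted
  simp only [if_neg (by decide : ¬ (false = true))]
  congr 1
  funext acc x
  congr 1
  funext a b
  simp only [pvKey, Prod.Lex.toLex_lt_toLex]
  by_cases h1 : PySem.Chars.count a.toList ['.'] < PySem.Chars.count b.toList ['.']
  · simp [PySem.Str.count, h1]
  · by_cases h2 : PySem.Chars.count b.toList ['.'] < PySem.Chars.count a.toList ['.']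
    · simp [PySem.Str.count, h1, h2,
        show ¬ PySem.Chars.count a.toList ['.'] = PySem.Chars.count b.toList ['.'] from by omega]
    · simp [PySem.Str.count, h1, h2, decide_eq_decide,
        show PySem.Chars.count a.toList ['.'] = PySem.Chars.count b.toList ['.'] from by omega]

theorem pvKey_inj : Function.Injective pvKey := by
  intro a b h
  unfold pvKey at h
  have := congrArg (fun x => (ofLex x).2) h
  simpa using this

theorem pvCountGo_single (c : Char) (l : List Char) (fuel acc : ℕ) (h : l.length ≤ fuel) :
    PySem.Chars.count.go [c] fuel l acc = acc + l.count c := by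
  induction l generalizing fuel acc with
  | nil => cases fuel <;> simp [PySem.Chars.count.go]
  | cons x t ih =>
    cases fuel with
    | zero => simp at h
    | succ fuel =>
      simp only [List.length_cons, Nat.add_le_add_iff_right] at h
      rw [PySem.Chars.count.go]
      by_cases hx : c = x
      · have hbeq : (c == x) = true := by simp [hx]
        simp only [List.isPrefixOf, hbeq, Bool.true_and, List.isPrefixOf_nil_left,
          if_pos, List.length_cons, List.length_nil, List.drop_succ_cons, List.drop_zero]
        rw [ih fuel (acc + 1) h]
        simp [List.count_cons, hx]
        omega
      · have hbeq : (c == x) = false := by simp [hx]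
        simp only [List.isPrefixOf, hbeq, Bool.false_and, Bool.false_eq_true, not_false_iff, if_neg]
        rw [ih fuel acc h]
        simp [List.count_cons, Ne.symm hx]

theorem pvStrCount_dot (s : String) : PySem.Str.count s "." = s.toList.count '.' := by
  unfold PySem.Str.count PySem.Chars.count
  have h : (".".toList) = ['.'] := rfl
  rw [h]
  simp only [List.isEmpty_cons, if_neg (by decide : ¬ (false = true))]
  rw [pvCountGo_single _ _ _ _ (le_refl _)]
  simp

theorem pvEndswith_iff (d e : String) :
    PySem.Str.endswith d ("." ++ e) = true ↔ pvSuf e d := by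
  rw [PySem.Str.endswith_eq, PySem.Chars.endswith_iff]
  unfold pvSuf
  rw [String.toList_append]
  rfl

theorem pvSuf_trans {e' e d : String} (h1 : pvSuf e' e) (h2 : pvSuf e d) : pvSuf e' d := by
  unfold pvSuf at *
  exact h1.trans ((List.suffix_cons '.' e.toList).trans h2)

theorem pvSuf_count {e d : String} (h : pvSuf e d) :
    PySem.Str.count e "." < PySem.Str.count d "." := by
  rw [pvStrCount_dot, pvStrCount_dot]
  obtain ⟨u, hu⟩ := h
  rw [← hu]
  simp [List.count_append, List.count_cons]
  omega

theorem pvSuf_key {e d : String} (h : pvSuf e d) : pvKey e < pvKey d := by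
  unfold pvKey
  rw [Prod.Lex.toLex_lt_toLex]
  exact Or.inl (pvSuf_count h)

theorem pvMinAnc (L : List String) (d : String) :
    ∀ (n : ℕ) (e : String), e ∈ L → pvSuf e d → PySem.Str.count e "." ≤ n →
    ∃ e', e' ∈ L ∧ pvSuf e' d ∧ ∀ f ∈ L, ¬ pvSuf f e' := by
  intro n
  induction n with
  | zero =>
    intro e he hsuf hcnt
    by_cases hex : ∃ f ∈ L, pvSuf f e
    · obtain ⟨f, hf, hfe⟩ := hex
      have := pvSuf_count hfe
      omega
    · exact ⟨e, he, hsuf, fun f hf hsuf => hex ⟨f, hf, hsuf⟩⟩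
  | succ n ih =>
    intro e he hsuf hcnt
    by_cases hex : ∃ f ∈ L, pvSuf f e
    · obtain ⟨f, hf, hfe⟩ := hex
      have := pvSuf_count hfe
      exact ih f hf (pvSuf_trans hfe hsuf) (by omega)
    · exact ⟨e, he, hsuf, fun f hf hsuf => hex ⟨f, hf, hsuf⟩⟩

theorem pvGreedy (L : List String) (hnd : L.Nodup)
    (hpw : L.Pairwise (fun a b => pvKey a < pvKey b)) :
    ∀ (rest pre : List String), L = pre ++ rest →
    rest.foldl
      (fun (sel : List String) domain =>
        if sel.any (fun keep => domain == keep || PySem.Str.endswith domain ("." ++ keep)) then sel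
        else sel ++ [domain])
      (pre.filter (fun d => !(L.any (fun e => PySem.Str.endswith d ("." ++ e)))))
    = L.filter (fun d => !(L.any (fun e => PySem.Str.endswith d ("." ++ e)))) := by
  intro rest
  induction rest with
  | nil => intro pre h; rw [List.foldl_nil, h, List.append_nil]
  | cons d rest' ih =>
    intro pre h
    rw [List.foldl_cons]
    have hcond : ((pre.filter (fun x => !(L.any (fun e => PySem.Str.endswith x ("." ++ e))))).any
        (fun keep => d == keep || PySem.Str.endswith d ("." ++ keep)))
        = !(!(L.any (fun e => PySem.Str.endswith d ("." ++ e)))) := by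
      rw [Bool.not_not]
      rcases hany : L.any (fun e => PySem.Str.endswith d ("." ++ e)) with _ | _
      · -- no ancestor in L: the selected list contains none either
        rw [List.any_eq_false] at hany ⊢
        intro keep hkeep
        rw [List.mem_filter] at hkeep
        have hkeepL : keep ∈ L := by rw [h]; exact List.mem_append_left _ hkeep.1
        simp only [Bool.or_eq_true, beq_iff_eq, not_or] at *
        constructor
        · -- d = keep impossible: d ∉ pre by Nodup
          intro hdk
          have : d ∉ pre := by
            have := hnd
            rw [h, List.nodup_append] at this
            exact fun hdp => this.2.2 d hdp d List.mem_cons_self rfl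
          exact this (hdk ▸ hkeep.1)
        · exact fun hx => hany keep hkeepL hx
      · -- some ancestor in L: a minimal one is in the selected prefix
        rw [List.any_eq_true] at hany
        obtain ⟨e, heL, hed⟩ := hany
        rw [pvEndswith_iff] at hed
        obtain ⟨e', he'L, he'd, hmin⟩ := pvMinAnc L d (PySem.Str.count e ".") e heL hed le_rfl
        have he'pre : e' ∈ pre := by
          rcases (by rw [h] at he'L; exact List.mem_append.mp he'L) with hp | hr
          · exact hp
          · exfalso
            rcases hr with _ | hr'
            · exact absurd (pvSuf_key he'd) (lt_irrefl _)
            · -- e' in rest' after d: pairwise gives pvKey d < pvKey e', contradiction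
              rw [h, List.pairwise_append] at hpw
              have := (List.pairwise_cons.mp hpw.2.1).1 e' (by assumption)
              exact absurd (lt_trans this (pvSuf_key he'd)) (lt_irrefl _)
        rw [List.any_eq_true]
        refine ⟨e', ?_, ?_⟩
        · rw [List.mem_filter]
          refine ⟨he'pre, ?_⟩
          rw [Bool.not_eq_true', List.any_eq_false]
          intro f hf
          rw [Bool.not_eq_true, ← Bool.not_eq_true]
          intro hfe
          exact hmin f hf ((pvEndswith_iff e' f).mp hfe)
        · rw [Bool.or_eq_true]
          exact Or.inr ((pvEndswith_iff d e').mpr he'd)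
    rw [hcond, Bool.not_not]
    rcases hany : L.any (fun e => PySem.Str.endswith d ("." ++ e)) with _ | _
    all_goals have hany' := hany
    all_goals simp only [PySem.Str.endswith_eq, String.toList_append,
      show (".".toList) = ['.'] from rfl, List.singleton_append] at hany'
    · -- d is kept
      rw [if_neg (by decide : ¬ (false = true))]
      have hstep : pre.filter (fun x => !(L.any (fun e => PySem.Str.endswith x ("." ++ e)))) ++ [d]
          = (pre ++ [d]).filter (fun x => !(L.any (fun e => PySem.Str.endswith x ("." ++ e)))) := by
        rw [List.filter_append]
        simp [hany']
      rw [hstep]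
      exact ih (pre ++ [d]) (by rw [h, List.append_assoc]; rfl)
    · -- d is dropped
      rw [if_pos rfl]
      have hstep : pre.filter (fun x => !(L.any (fun e => PySem.Str.endswith x ("." ++ e))))
          = (pre ++ [d]).filter (fun x => !(L.any (fun e => PySem.Str.endswith x ("." ++ e)))) := by
        rw [List.filter_append]
        simp [hany']
      rw [hstep]
      exact ih (pre ++ [d]) (by rw [h, List.append_assoc]; rfl)

theorem pvCompactA_eq_B (ds : List String) :
    pvCompactA ds PySem.Set.empty = pvCompactB ds := by
  unfold pvCompactA pvCompactB
  simp only [pvSorted2_eq_sorted]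
  set L := PySem.List.sorted (PySem.Set.ofList ds) pvKey false with hL
  have hnd : L.Nodup :=
    (PySem.List.sorted_perm (PySem.Set.ofList ds) pvKey false).symm.nodup (PySem.Set.nodup_ofList ds)
  have hpw : L.Pairwise (fun a b => pvKey a < pvKey b) := by
    have h1 := PySem.List.sorted_pairwise (PySem.Set.ofList ds) pvKey
    have h2 : L.Pairwise (· ≠ ·) := hnd
    exact (h1.and h2).imp (fun h => lt_of_le_of_ne h.1 (fun hk => h.2 (pvKey_inj hk)))
  have hlam : (fun (sel : List String) domain =>
      if (PySem.Set.empty : PySem.Set String).contains domain then sel ++ [domain]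
      else if sel.any (fun keep => domain == keep || PySem.Str.endswith domain ("." ++ keep)) then sel
      else sel ++ [domain])
      = (fun (sel : List String) domain =>
      if sel.any (fun keep => domain == keep || PySem.Str.endswith domain ("." ++ keep)) then sel
      else sel ++ [domain]) := by
    funext sel domain
    rfl
  rw [hlam]
  have hsel := pvGreedy L hnd hpw L [] rfl
  simp only [List.filter_nil] at hsel
  rw [hsel]
  have hndf : (L.filter (fun d => !(L.any (fun e => PySem.Str.endswith d ("." ++ e))))).Nodup :=
    hnd.filter _
  rw [PySem.Set.ofList_eq_self_of_nodup _ hndf]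
  exact PySem.List.sorted_eq_of_perm_of_pairwise_lt _ _ pvKey (List.Perm.refl _)
    (hpw.sublist (List.filter_sublist))

theorem pvZipIdx_flatMap (bs : List (List String)) (n : ℕ) :
    (bs.zipIdx (n + 1)).flatMap (fun q => if q.2 == 0 then q.1 else "" :: q.1)
    = bs.flatMap (fun b => "" :: b) := by
  induction bs generalizing n with
  | nil => rfl
  | cons b bs ih =>
    rw [List.zipIdx_cons, List.flatMap_cons, List.flatMap_cons, ih (n + 1)]
    simp

theorem pvFold_false (secs : List (String × List String)) (init : List String) :
    secs.foldl
      (fun (p : List String × Bool) sec =>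
        if sec.2.isEmpty then p
        else ((if p.2 then p.1 else p.1 ++ [""]) ++ ["# " ++ sec.1]
                ++ sec.2.map (fun domain => "DOMAIN-SUFFIX," ++ domain), false))
      (init, false)
    = (init ++ ((secs.filter (fun p => !p.2.isEmpty)).map
        (fun p => ("# " ++ p.1) :: p.2.map (fun d => "DOMAIN-SUFFIX," ++ d))).flatMap
          (fun b => "" :: b), false) := by
  induction secs generalizing init with
  | nil => simp
  | cons sec secs ih =>
    rw [List.foldl_cons]
    by_cases h : sec.2.isEmpty
    · rw [if_pos h, ih init, List.filter_cons_of_neg (by simp [h])]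
    · rw [if_neg h, List.filter_cons_of_pos (by simp [h])]
      rw [ih ((if false = true then init else init ++ [""]) ++ ["# " ++ sec.1]
                ++ sec.2.map (fun domain => "DOMAIN-SUFFIX," ++ domain))]
      simp

theorem pvFold_true (secs : List (String × List String)) (init : List String) :
    (secs.foldl
      (fun (p : List String × Bool) sec =>
        if sec.2.isEmpty then p
        else ((if p.2 then p.1 else p.1 ++ [""]) ++ ["# " ++ sec.1]
                ++ sec.2.map (fun domain => "DOMAIN-SUFFIX," ++ domain), false))
      (init, true)).1
    = init ++ (((secs.filter (fun p => !p.2.isEmpty)).map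
        (fun p => ("# " ++ p.1) :: p.2.map (fun d => "DOMAIN-SUFFIX," ++ d))).zipIdx).flatMap
          (fun q => if q.2 == 0 then q.1 else "" :: q.1) := by
  induction secs generalizing init with
  | nil => simp
  | cons sec secs ih =>
    rw [List.foldl_cons]
    by_cases h : sec.2.isEmpty
    · rw [if_pos h, ih init, List.filter_cons_of_neg (by simp [h])]
    · rw [if_neg h, List.filter_cons_of_pos (by simp [h])]
      rw [pvFold_false]
      simp only [List.map_cons, List.zipIdx_cons, List.flatMap_cons, pvZipIdx_flatMap 
        ((secs.filter (fun p => !p.2.isEmpty)).map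
          (fun p => ("# " ++ p.1) :: p.2.map (fun d => "DOMAIN-SUFFIX," ++ d))) 0]
      simp

theorem render_list_spec : Claim_equal_render_list := by
  unfold Claim_equal_render_list Spec_render_list
  intro header_lines manual_sections extra_sections tail_comment tail_domains _
  simp only [render_list, render_list_alt]
  rw [show (fun (p : String × List String) => (p.1, pvUPO p.2))
        = (fun (p : String × List String) => (p.1, PySem.List.dedup p.2)) from
      funext (fun p => by rw [pvUPO_eq_dedup]),
    show (fun (p : String × List String) => (p.1, pvCompactA p.2 PySem.Set.empty))
        = (fun (p : String × List String) => (p.1, pvCompactB p.2)) from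
      funext (fun p => by rw [pvCompactA_eq_B])]
  rw [pvFold_true]
  by_cases h : tail_domains.isEmpty
  · rw [if_pos h, if_pos h]
    congr 1
    simp [List.append_assoc]
  · rw [if_neg h, if_neg h]
    congr 1
    simp [List.append_assoc]
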